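-- pv_equiv track=rewrite | github.com/rockymeza/wifi | wifi/keyderiv.py | wep_64
-- ===== SOURCE A (Python) =====
-- def wep_64(s, n=0):
--     """
--     Given a passphase s and zero-index key number n, generate the wep-64 key for it.
--     """
--     prn = 0
--     for index, c in enumerate(s):
--         prn ^= ord(c) << (8*(index & 3))
--     keys = []
--     def permute(prn):
--         prn *= 0x343fd
--         prn += 0x269ec3
--         prn &= 0xFFFFFFFF
--         return prn
--     for i in range(n * 5):
--         prn = permute(prn)
--     out = ""
--     for i in range(5):
--         prn = permute(prn)
--         out += "%02x" % ((prn >> 16) & 0xFF)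
--     return out
-- ===== SOURCE B (Python) =====
-- def wep_64(s, n=0):
--     """
--     Given a passphase s and zero-index key number n, generate the wep-64 key for it.
--     """
--     M = 1 << 32
--     A, C = 0x343fd, 0x269ec3
--     seed = 0
--     for index, c in enumerate(s):
--         seed ^= ord(c) << (8 * (index & 3))
--     # Skip the first 5*n PRNG states in O(log n) by binary exponentiation
--     # of the affine map x -> A*x + C (mod 2^32).
--     a, c = 1, 0
--     pa, pc = A, C
--     k = n * 5 if n > 0 else 0
--     while k:
--         if k & 1:
--             a, c = pa * a % M, (pa * c + pc) % M
--         pa, pc = pa * pa % M, (pa * pc + pc) % M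
--         k >>= 1
--     prn = (a * seed + c) % M
--     out = []
--     for _ in range(5):
--         prn = (A * prn + C) % M
--         out.append("%02x" % ((prn >> 16) & 0xFF))
--     return "".join(out)
-- ===== Notes on version B (the rewrite author's own statement) =====
-- stated objective: faster
-- what changed: The 5*n warm-up iterations of the LCG are replaced by binary exponentiation of the affine map x -> 0x343fd*x + 0x269ec3 (mod 2^32), composing maps by squaring, so the key-index skip costs O(log n) instead of O(n).
import Mathlib
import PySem

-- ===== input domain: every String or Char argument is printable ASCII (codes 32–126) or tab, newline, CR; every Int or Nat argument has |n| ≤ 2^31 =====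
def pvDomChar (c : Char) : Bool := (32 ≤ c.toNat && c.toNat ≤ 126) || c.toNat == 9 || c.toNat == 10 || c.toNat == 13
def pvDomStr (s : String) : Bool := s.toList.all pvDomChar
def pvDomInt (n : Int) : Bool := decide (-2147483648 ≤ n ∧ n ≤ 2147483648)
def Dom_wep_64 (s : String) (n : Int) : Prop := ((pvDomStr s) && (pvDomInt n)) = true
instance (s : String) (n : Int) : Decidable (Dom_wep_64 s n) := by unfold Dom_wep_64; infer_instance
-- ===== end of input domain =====

-- B replaces A's 5*n warm-up LCG iterations by binary exponentiation of the affine map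
-- x ↦ 0x343fd*x + 0x269ec3 (mod 2^32), for an O(len(s)+log n) instead of O(len(s)+n) runtime.

-- ===== PORT A =====
-- All Python ints in A stay nonnegative (prn starts at 0, is xor/mul/add/&-ed with
-- nonnegative values), so the port carries them as Nat; `&`, `^`, `<<` are Nat's
-- &&&, ^^^, <<< which agree with Python's on nonnegative ints.
def pvPermA (prn : Nat) : Nat := (prn * 0x343fd + 0x269ec3) &&& 0xFFFFFFFF

def pvHexDig (d : Nat) : Char := if d < 10 then Char.ofNat (48 + d) else Char.ofNat (87 + d)

-- "%02x" % b for 0 ≤ b < 256: exactly two lowercase hex digits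
def pvHex2 (b : Nat) : String := String.ofList [pvHexDig (b / 16), pvHexDig (b % 16)]

def wep_64 (s : String) (n : Int) : String :=
  -- for index, c in enumerate(s): prn ^= ord(c) << (8*(index & 3))  (index ≥ 0, so .toNat is exact)
  let prn0 : Nat := (PySem.List.enumerate s.toList 0).foldl
    (fun prn ic => prn ^^^ (ic.2.toNat <<< (8 * (ic.1.toNat &&& 3)))) 0
  -- for i in range(n * 5): prn = permute(prn)
  let prn1 : Nat := (PySem.List.pyRange 0 (n * 5) 1).foldl (fun prn _ => pvPermA prn) prn0
  -- for i in range(5): prn = permute(prn); out += "%02x" % ((prn >> 16) & 0xFF)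
  let r := (PySem.List.pyRange 0 5 1).foldl
    (fun st _ => let p := pvPermA st.1; (p, st.2 ++ pvHex2 ((p >>> 16) &&& 0xFF)))
    (prn1, "")
  r.2

-- ===== PORT B =====
def pvStepB (prn : Nat) : Nat := (0x343fd * prn + 0x269ec3) % 4294967296

-- the while-loop of Source B: binary exponentiation over the affine pairs (a,c) and (pa,pc)
def pvBexp (k : Nat) (ac pp : Nat × Nat) : Nat × Nat :=
  if k = 0 then ac
  else
    let ac' := if k &&& 1 = 1 then
        (pp.1 * ac.1 % 4294967296, (pp.1 * ac.2 + pp.2) % 4294967296)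
      else ac
    pvBexp (k >>> 1) ac' (pp.1 * pp.1 % 4294967296, (pp.1 * pp.2 + pp.2) % 4294967296)
  decreasing_by simp [Nat.shiftRight_one]; omega

def wep_64_alt (s : String) (n : Int) : String :=
  let seed : Nat := (PySem.List.enumerate s.toList 0).foldl
    (fun prn ic => prn ^^^ (ic.2.toNat <<< (8 * (ic.1.toNat &&& 3)))) 0
  -- k = n * 5 if n > 0 else 0  (k ≥ 0, carried as Nat)
  let k : Nat := if 0 < n then (n * 5).toNat else 0
  let ac := pvBexp k (1, 0) (0x343fd, 0x269ec3)
  let prn : Nat := (ac.1 * seed + ac.2) % 4294967296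
  let r := (PySem.List.pyRange 0 5 1).foldl
    (fun st _ => let p := pvStepB st.1; (p, st.2 ++ [pvHex2 ((p >>> 16) &&& 0xFF)]))
    (prn, ([] : List String))
  PySem.Str.join "" r.2

-- ===== PRECONDITION & SPEC =====
def Spec_wep_64 (s : String) (n : Int) (out : String) : Prop := out = wep_64_alt s n
instance (s : String) (n : Int) (out : String) : Decidable (Spec_wep_64 s n out) := by unfold Spec_wep_64; infer_instance

-- ===== CLAIM (what is proved, stated in full; the proofs are below) =====
def Claim_equal_wep_64 : Prop := ∀ (s : String) (n : Int), Dom_wep_64 s n → Spec_wep_64 s n (wep_64 s n)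

-- ===== LEMMAS AND PROOFS =====

-- A's masked permute equals B's mod-reduced step
theorem permA_eq_stepB : pvPermA = pvStepB := by
  funext x
  unfold pvPermA pvStepB
  have h := Nat.and_two_pow_sub_one_eq_mod (x * 0x343fd + 0x269ec3) 32
  norm_num at h ⊢
  rw [Nat.mul_comm 214013 x]
  exact h

theorem stepB_congr {x y : Nat} (h : x % 4294967296 = y % 4294967296) :
    pvStepB x = pvStepB y := by
  unfold pvStepB
  rw [Nat.add_mod, Nat.mul_mod, h, ← Nat.mul_mod, ← Nat.add_mod]

-- a constant-body foldl only counts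
theorem foldl_const_iterate {α β : Type} (l : List α) (f : β → β) (x : β) :
    l.foldl (fun p _ => f p) x = f^[l.length] x := by
  induction l generalizing x with
  | nil => rfl
  | cons a t ih => simp [List.foldl, ih, Function.iterate_succ_apply]

-- affine map application (proof-only helper)
def pvAff (p : Nat × Nat) (x : Nat) : Nat := (p.1 * x + p.2) % 4294967296

theorem aff_comp (p q : Nat × Nat) (x : Nat) :
    pvAff (p.1 * q.1 % 4294967296, (p.1 * q.2 + p.2) % 4294967296) x
      = pvAff p (pvAff q x) := by
  unfold pvAff
  have h1 : (p.1 * q.1 % 4294967296) * x + (p.1 * q.2 + p.2) % 4294967296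
      ≡ p.1 * q.1 * x + (p.1 * q.2 + p.2) [MOD 4294967296] :=
    Nat.ModEq.add ((Nat.mod_modEq _ _).mul_right x) (Nat.mod_modEq _ _)
  have h2 : p.1 * ((q.1 * x + q.2) % 4294967296) + p.2
      ≡ p.1 * (q.1 * x + q.2) + p.2 [MOD 4294967296] :=
    Nat.ModEq.add ((Nat.mod_modEq _ _).mul_left p.1) Nat.ModEq.rfl
  have h3 : p.1 * q.1 * x + (p.1 * q.2 + p.2) = p.1 * (q.1 * x + q.2) + p.2 := by ring
  calc ((p.1 * q.1 % 4294967296) * x + (p.1 * q.2 + p.2) % 4294967296) % 4294967296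
      = (p.1 * q.1 * x + (p.1 * q.2 + p.2)) % 4294967296 := h1
    _ = (p.1 * ((q.1 * x + q.2) % 4294967296) + p.2) % 4294967296 := by rw [h3]; exact h2.symm

theorem aff_sq_iterate (pp : Nat × Nat) (m : Nat) (z : Nat) :
    (pvAff (pp.1 * pp.1 % 4294967296, (pp.1 * pp.2 + pp.2) % 4294967296))^[m] z
      = (pvAff pp)^[2 * m] z := by
  induction m generalizing z with
  | zero => rfl
  | succ m ih =>
    rw [Function.iterate_succ_apply, ih, aff_comp]
    have : 2 * (m + 1) = (2 * m) + 1 + 1 := by ring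
    rw [this, Function.iterate_succ_apply, Function.iterate_succ_apply]

theorem bexp_spec (k : Nat) : ∀ (ac pp : Nat × Nat) (x : Nat),
    pvAff (pvBexp k ac pp) x = (pvAff pp)^[k] (pvAff ac x) := by
  induction k using Nat.strong_induction_on with
  | _ k ih =>
    intro ac pp x
    rw [pvBexp]
    by_cases hk : k = 0
    · simp [hk]
    · have hlt : k >>> 1 < k := by simp [Nat.shiftRight_one]; omega
      simp only [hk, if_false]
      rw [ih (k >>> 1) hlt, aff_sq_iterate]
      have hsh : k >>> 1 = k / 2 := Nat.shiftRight_one k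
      have hand : k &&& 1 = k % 2 := Nat.and_one_is_mod k
      by_cases hodd : k &&& 1 = 1
      · simp only [hodd, if_true]
        rw [aff_comp, ← Function.iterate_succ_apply]
        have : (2 * (k >>> 1)).succ = k := by
          rw [hsh]; rw [hand] at hodd; omega
        rw [this]
      · simp only [if_neg hodd]
        have : 2 * (k >>> 1) = k := by rw [hsh]; rw [hand] at hodd; omega
        rw [this]

theorem iter_mod (k x : Nat) :
    pvStepB^[k] x % 4294967296 = pvStepB^[k] (x % 4294967296) % 4294967296 := by
  cases k with
  | zero => simp only [Function.iterate_zero, id]; exact (Nat.mod_mod _ _).symm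
  | succ k =>
    rw [Function.iterate_succ_apply, Function.iterate_succ_apply,
      stepB_congr (Nat.mod_mod x 4294967296).symm]

theorem join5 (a b c d e : String) :
    PySem.Str.join "" [a, b, c, d, e] = "" ++ a ++ b ++ c ++ d ++ e := by
  apply String.toList_injective
  simp only [PySem.Str.toList_join, PySem.Chars.join, String.toList_append]
  simp [List.intercalate]

theorem pyRange5 : PySem.List.pyRange 0 5 1 = [0, 1, 2, 3, 4] := by decide

-- ===== VERDICT (by name: the statement is the Claim_ definition above) =====
theorem wep_64_spec : Claim_equal_wep_64 := by
  intro s n _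
  unfold Spec_wep_64
  rw [wep_64, wep_64_alt]
  simp only [pyRange5, List.foldl, permA_eq_stepB]
  set seed : Nat := (PySem.List.enumerate s.toList 0).foldl
    (fun prn ic => prn ^^^ (ic.2.toNat <<< (8 * (ic.1.toNat &&& 3)))) 0 with hseed
  have hkk : (if 0 < n then (n * 5).toNat else 0) = (n * 5 - 0).toNat := by split <;> omega
  rw [hkk]
  have hwA : List.foldl (fun prn _ => pvStepB prn) seed (PySem.List.pyRange 0 (n * 5) 1)
      = pvStepB^[(n * 5 - 0).toNat] seed := by
    rw [foldl_const_iterate, PySem.List.length_pyRange_one]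
  have hwB : ((pvBexp (n * 5 - 0).toNat (1, 0) (214013, 2531011)).1 * seed
        + (pvBexp (n * 5 - 0).toNat (1, 0) (214013, 2531011)).2) % 4294967296
      = pvStepB^[(n * 5 - 0).toNat] (seed % 4294967296) := by
    have h := bexp_spec (n * 5 - 0).toNat (1, 0) (214013, 2531011) seed
    rw [show pvAff (214013, 2531011) = pvStepB from rfl] at h
    rw [show pvAff (1, 0) seed = seed % 4294967296 from by simp [pvAff]] at h
    unfold pvAff at h
    exact h
  rw [hwA, hwB]
  have h1 : pvStepB (pvStepB^[(n * 5 - 0).toNat] (seed % 4294967296))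
      = pvStepB (pvStepB^[(n * 5 - 0).toNat] seed) :=
    stepB_congr (iter_mod (n * 5 - 0).toNat seed).symm
  rw [h1]
  simp only [List.nil_append, List.cons_append]
  exact (join5 _ _ _ _ _).symm
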